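-- pv_equiv track=rewrite | github.com/agheieff/Collatz | cycles/binary_dev/analysis/verification/verify_cycles_k9_100.py | check_j_pattern_modular
-- ===== SOURCE A (Python) =====
-- from typing import List, Tuple, Optional, Set
--
-- def check_j_pattern_modular(pattern: List[int]) -> bool:
--     """
--     Check if a j-pattern can close modularly.
--     Returns True if the pattern could potentially form a cycle.
--     """
--     k = len(pattern)
--
--     # Try all starting points n ≡ 1 (mod 8) up to mod 64
--     for n0_mod64 in range(1, 64, 8):
--         n = n0_mod64
--         valid = True
--
--         for j in pattern:
--             if j == 2:
--                 if n % 8 != 1: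
--                     valid = False
--                     break
--                 n = ((3 * n + 1) // 4) % 64
--             else:  # j == 1
--                 n = ((3 * n + 1) // 2) % 64
--
--         if valid and n % 8 == n0_mod64 % 8:
--             # Pattern returns to same mod 8 class
--             return True
--
--     return False
-- ===== SOURCE B (Python) =====
-- def check_j_pattern_modular(pattern):
--     """
--     Check if a j-pattern can close modularly.
--     Returns True if the pattern could potentially form a cycle.
--     """
--     # Propagate the set of live residues mod 64 forward through the pattern once.
--     live = {1, 9, 17, 25, 33, 41, 49, 57}
--     for j in pattern:
--         if j == 2:
--             live = {((3 * n + 1) // 4) % 64 for n in live if n % 8 == 1}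
--         else:  # j == 1
--             live = {((3 * n + 1) // 2) % 64 for n in live}
--     # every start is ≡ 1 (mod 8), so closing mod 8 means ending ≡ 1 (mod 8)
--     return any(n % 8 == 1 for n in live)
-- ===== Notes on version B (the rewrite author's own statement) =====
-- stated objective: alternative
-- what changed: Interchanged the loops: instead of simulating the pattern 8 times (once per starting residue, with a valid flag and break), B makes one forward pass over the pattern propagating a shrinking SET of live residues mod 64, dropping residues that fail the j==2 condition, and checks at the end whether any survivor is 1 mod 8.
import Mathlib
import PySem

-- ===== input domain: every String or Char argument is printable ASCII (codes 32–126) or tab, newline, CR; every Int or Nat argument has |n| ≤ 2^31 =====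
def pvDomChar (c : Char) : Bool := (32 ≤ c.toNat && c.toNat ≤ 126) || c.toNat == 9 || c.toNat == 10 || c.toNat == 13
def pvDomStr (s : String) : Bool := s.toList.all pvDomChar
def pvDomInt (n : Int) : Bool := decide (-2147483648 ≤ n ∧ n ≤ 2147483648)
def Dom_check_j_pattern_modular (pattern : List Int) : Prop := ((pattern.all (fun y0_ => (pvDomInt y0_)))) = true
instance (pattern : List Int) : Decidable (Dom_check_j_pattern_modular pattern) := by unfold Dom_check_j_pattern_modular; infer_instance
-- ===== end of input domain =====

-- B interchanges the loops: a single forward pass propagating a shrinking SET of live residues mod 64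
-- (objective: alternative decomposition, same cost).

-- ===== PORT A =====
-- inner 'for j in pattern' loop of A: returns some n (final value) if valid, none on break
def pvA_inner : List Int → Int → Option Int
  | [], n => some n
  | j :: rest, n =>
    if j = 2 then
      if PySem.Int.mod n 8 ≠ 1 then none
      else pvA_inner rest (PySem.Int.mod (PySem.Int.floordiv (3 * n + 1) 4) 64)
    else
      pvA_inner rest (PySem.Int.mod (PySem.Int.floordiv (3 * n + 1) 2) 64)

-- outer 'for n0_mod64 in range(1, 64, 8)' loop with its early 'return True'
def pvA_outer : List Int → List Int → Bool
  | [], _ => false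
  | n0 :: rest, p =>
    match pvA_inner p n0 with
    | some n =>
        if PySem.Int.mod n 8 = PySem.Int.mod n0 8 then true else pvA_outer rest p
    | none => pvA_outer rest p

def check_j_pattern_modular (pattern : List Int) : Bool :=
  pvA_outer (PySem.List.pyRange 1 64 8) pattern

-- ===== PORT B =====
-- one step of B's pass: the set comprehension for one j
def pvB_step (live : PySem.Set Int) (j : Int) : PySem.Set Int :=
  if j = 2 then
    PySem.Set.ofList ((live.filter (fun n => decide (PySem.Int.mod n 8 = 1))).map
      (fun n => PySem.Int.mod (PySem.Int.floordiv (3 * n + 1) 4) 64))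
  else
    PySem.Set.ofList (live.map (fun n => PySem.Int.mod (PySem.Int.floordiv (3 * n + 1) 2) 64))

def check_j_pattern_modular_alt (pattern : List Int) : Bool :=
  (pattern.foldl pvB_step (PySem.Set.ofList [1, 9, 17, 25, 33, 41, 49, 57])).any
    (fun n => decide (PySem.Int.mod n 8 = 1))

-- ===== PRECONDITION & SPEC =====
def Spec_check_j_pattern_modular (pattern : List Int) (out : Bool) : Prop := out = check_j_pattern_modular_alt pattern
instance (pattern : List Int) (out : Bool) : Decidable (Spec_check_j_pattern_modular pattern out) := by unfold Spec_check_j_pattern_modular; infer_instance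

-- ===== CLAIM (what is proved, stated in full; the proofs are below) =====
def Claim_equal_check_j_pattern_modular : Prop := ∀ (pattern : List Int), Dom_check_j_pattern_modular pattern → Spec_check_j_pattern_modular pattern (check_j_pattern_modular pattern)

-- ===== LEMMAS AND PROOFS =====

-- bridges: Python mod/floordiv with these positive divisors are Lean's emod/ediv
theorem pv_mod8 (n : Int) : PySem.Int.mod n 8 = n % 8 :=
  PySem.Int.mod_eq_emod_of_pos (by norm_num)
theorem pv_mod64 (n : Int) : PySem.Int.mod n 64 = n % 64 :=
  PySem.Int.mod_eq_emod_of_pos (by norm_num)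
theorem pv_fd2 (n : Int) : PySem.Int.floordiv n 2 = n / 2 :=
  PySem.Int.floordiv_eq_ediv_of_pos (by norm_num)
theorem pv_fd4 (n : Int) : PySem.Int.floordiv n 4 = n / 4 :=
  PySem.Int.floordiv_eq_ediv_of_pos (by norm_num)

theorem pv_inner_cons (j : Int) (rest : List Int) (n : Int) :
    pvA_inner (j :: rest) n =
      if j = 2 then
        (if n % 8 ≠ 1 then none else pvA_inner rest ((3 * n + 1) / 4 % 64))
      else pvA_inner rest ((3 * n + 1) / 2 % 64) := by
  simp only [pvA_inner, pv_mod8, pv_mod64, pv_fd2, pv_fd4]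

-- membership in one B step = one A step succeeding from some member
theorem pv_mem_step (S : PySem.Set Int) (j m : Int) :
    m ∈ pvB_step S j ↔ ∃ n ∈ S,
      (if j = 2 then (if n % 8 ≠ 1 then none else some ((3 * n + 1) / 4 % 64))
       else some ((3 * n + 1) / 2 % 64)) = some m := by
  unfold pvB_step
  simp only [pv_mod8, pv_mod64, pv_fd2, pv_fd4]
  split_ifs with hj
  · simp only [PySem.Set.mem_ofList, List.mem_map, List.mem_filter, decide_eq_true_eq]
    constructor
    · rintro ⟨n, ⟨hn, h1⟩, rfl⟩
      exact ⟨n, hn, by simp [h1]⟩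
    · rintro ⟨n, hn, h⟩
      by_cases h1 : n % 8 = 1
      · simp only [h1, ne_eq, not_true_eq_false, if_false, Option.some.injEq] at h
        exact ⟨n, ⟨hn, h1⟩, h⟩
      · simp [h1] at h
  · simp only [PySem.Set.mem_ofList, List.mem_map, Option.some.injEq]

-- the foldl of B over the pattern collects exactly the successful outcomes of A's inner loop
theorem pv_mem_foldl (p : List Int) : ∀ (S : PySem.Set Int) (m : Int),
    m ∈ p.foldl pvB_step S ↔ ∃ n ∈ S, pvA_inner p n = some m := by
  induction p with
  | nil => intro S m; simp [pvA_inner]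
  | cons j rest ih =>
      intro S m
      simp only [List.foldl_cons]
      rw [ih]
      constructor
      · rintro ⟨n, hn, h⟩
        rcases (pv_mem_step S j n).1 hn with ⟨n0, hn0, hstep⟩
        refine ⟨n0, hn0, ?_⟩
        rw [pv_inner_cons]
        by_cases hj : j = 2
        · subst hj
          by_cases h1 : n0 % 8 = 1
          · simp only [h1, ne_eq, not_true_eq_false, if_false, reduceIte,
              Option.some.injEq] at hstep
            simpa [h1, hstep] using h
          · simp [h1] at hstep
        · simp only [if_neg hj, Option.some.injEq] at hstep
          simpa [hj, hstep] using h
      · rintro ⟨n0, hn0, h⟩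
        rw [pv_inner_cons] at h
        by_cases hj : j = 2
        · subst hj
          by_cases h1 : n0 % 8 = 1
          · refine ⟨(3 * n0 + 1) / 4 % 64, (pv_mem_step S 2 _).2 ⟨n0, hn0, by simp [h1]⟩, ?_⟩
            simpa [h1] using h
          · simp [h1] at h
        · exact ⟨(3 * n0 + 1) / 2 % 64, (pv_mem_step S j _).2 ⟨n0, hn0, by simp [hj]⟩,
            by simpa [hj] using h⟩

-- A's outer loop with early return is an existential over the start list
theorem pv_outer_iff (l p : List Int) :
    pvA_outer l p = true ↔ ∃ n0 ∈ l, ∃ m, pvA_inner p n0 = some m ∧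
      m % 8 = n0 % 8 := by
  induction l with
  | nil => simp [pvA_outer]
  | cons n0 rest ih =>
      unfold pvA_outer
      cases h : pvA_inner p n0 with
      | none =>
          simp only [ih, List.mem_cons]
          constructor
          · rintro ⟨n, hn, hm⟩; exact ⟨n, Or.inr hn, hm⟩
          · rintro ⟨n, hn | hn, hm⟩
            · subst hn; rcases hm with ⟨m, hm, _⟩; rw [h] at hm; cases hm
            · exact ⟨n, hn, hm⟩
      | some n =>
          simp only [pv_mod8]
          by_cases hc : n % 8 = n0 % 8
          · simp only [if_pos hc, true_iff]
            exact ⟨n0, List.mem_cons_self .., n, h, hc⟩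
          · simp only [if_neg hc, ih, List.mem_cons]
            constructor
            · rintro ⟨x, hx, hm⟩; exact ⟨x, Or.inr hx, hm⟩
            · rintro ⟨x, hx | hx, hm⟩
              · subst hx; rcases hm with ⟨m, hm, hmm⟩
                rw [h] at hm; cases hm; exact absurd hmm hc
              · exact ⟨x, hx, hm⟩

theorem pv_starts : PySem.List.pyRange 1 64 8 = ([1, 9, 17, 25, 33, 41, 49, 57] : List Int) := by
  decide

theorem pv_ofList_starts :
    PySem.Set.ofList ([1, 9, 17, 25, 33, 41, 49, 57] : List Int) = [1, 9, 17, 25, 33, 41, 49, 57] := by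
  decide

theorem pv_mod_starts : ∀ n0 ∈ ([1, 9, 17, 25, 33, 41, 49, 57] : List Int),
    n0 % 8 = 1 := by decide

-- ===== VERDICT (by name: the statement is the Claim_ definition above) =====
theorem check_j_pattern_modular_spec : Claim_equal_check_j_pattern_modular := by
  intro p _
  unfold Spec_check_j_pattern_modular
  rw [Bool.eq_iff_iff]
  unfold check_j_pattern_modular check_j_pattern_modular_alt
  rw [pv_starts, pv_ofList_starts, pv_outer_iff, List.any_eq_true]
  simp only [decide_eq_true_eq, pv_mod8]
  constructor
  · rintro ⟨n0, hn0, m, hm, he⟩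
    exact ⟨m, (pv_mem_foldl p _ m).2 ⟨n0, hn0, hm⟩, he.trans (pv_mod_starts n0 hn0)⟩
  · rintro ⟨m, hm, he⟩
    rcases (pv_mem_foldl p _ m).1 hm with ⟨n0, hn0, h⟩
    exact ⟨n0, hn0, m, h, he.trans (pv_mod_starts n0 hn0).symm⟩
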